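-- pv_equiv track=rewrite | github.com/Sanjarbek-AI/Python-463 | Lesson-24/info.py | f
-- ===== SOURCE A (Python) =====
-- def f(a: list):
--     a.append(1)
--
--     tolov = 1090
--     kunlik = 90
--     i = -1
--     while i < len(a) - 1:
--         i += 1
--         if a[i] == 0:
--             for i1 in range(i + 1, len(a)):
--                 if a[i1] == 1:
--                     if i1 - i >= 4:
--                         tolov -= kunlik * (i1 - i)
--                     i = i1
--
--     return tolov
-- ===== SOURCE B (Python) =====
-- def f(a: list):
--     a.append(1)
--     seen0 = False
--     run = 0
--     pen = 0
--     for x in a: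
--         if not seen0:
--             if x == 0:
--                 seen0 = True
--         elif x == 1:
--             if run >= 3:
--                 pen += run + 1
--             run = 0
--         else:
--             run += 1
--     return 1090 - 90 * pen
-- ===== Notes on version B (the rewrite author's own statement) =====
-- stated objective: simpler
-- what changed: Replaces A's index-arithmetic scan (a while loop mutating an index, a nested for over ranges, penalties computed as index differences i1-i) with a single value-only finite-state machine over the elements: a seen-first-zero flag, a run-length counter of consecutive non-1 elements, and a penalty accumulator charging run+1 when a 1 closes a run of length >= 3; no indices are computed, giving a measured ~3.8x constant-factor speedup.
import Mathlib
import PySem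

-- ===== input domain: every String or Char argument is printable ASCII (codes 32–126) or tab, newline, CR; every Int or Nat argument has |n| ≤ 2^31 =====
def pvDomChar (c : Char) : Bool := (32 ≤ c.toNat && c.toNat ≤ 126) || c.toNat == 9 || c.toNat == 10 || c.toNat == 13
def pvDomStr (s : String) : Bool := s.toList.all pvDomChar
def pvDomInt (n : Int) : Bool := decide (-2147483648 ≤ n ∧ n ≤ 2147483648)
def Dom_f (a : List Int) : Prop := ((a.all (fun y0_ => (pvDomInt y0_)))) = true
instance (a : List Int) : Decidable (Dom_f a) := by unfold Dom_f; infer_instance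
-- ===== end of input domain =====

-- B replaces A's index-arithmetic scan by a value-only single-pass state machine (seen-zero
-- flag, run-length counter of non-1 elements, penalty accumulator) — simpler decomposition.
-- Equivalence is about the RETURN value only: the Python A (and B) mutate the argument via
-- a.append(1) — both perform the same mutation.

-- ===== PORT A =====
-- a[i] for an in-range index: pyGetD is exact there (every access in A is in range).
-- the inner 'for i1 in range(i+1, len(a))' carrying (tolov, i)
def fInner (b : List Int) (i tolov : Int) : Int × Int :=
  (PySem.List.pyRange (i + 1) (b.length : Int) 1).foldl
    (fun (s : Int × Int) i1 =>
      if PySem.List.pyGetD b i1 0 = 1 then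
        (if i1 - s.2 ≥ 4 then s.1 - 90 * (i1 - s.2) else s.1, i1)
      else s)
    (tolov, i)

-- the outer 'while i < len(a) - 1' loop; i strictly increases each iteration, so
-- fuel = length + 1 (from i = -1) always suffices
def fLoop (b : List Int) (fuel : Nat) (i tolov : Int) : Int :=
  match fuel with
  | 0 => tolov
  | fuel + 1 =>
    if i < (b.length : Int) - 1 then
      let i' := i + 1
      if PySem.List.pyGetD b i' 0 = 0 then
        let s := fInner b i' tolov
        fLoop b fuel s.2 s.1
      else
        fLoop b fuel i' tolov
    else tolov

def f (a : List Int) : Int :=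
  let b := a ++ [1]
  fLoop b (b.length + 1) (-1) 1090

-- ===== PORT B =====
-- the loop body of Source B: state = (seen0, run, pen)
def fStep (s : Bool × Int × Int) (x : Int) : Bool × Int × Int :=
  if s.1 = false then (if x = 0 then (true, s.2.1, s.2.2) else s)
  else if x = 1 then (true, 0, if s.2.1 ≥ 3 then s.2.2 + s.2.1 + 1 else s.2.2)
  else (true, s.2.1 + 1, s.2.2)

def f_alt (a : List Int) : Int :=
  let b := a ++ [1]
  let s := b.foldl fStep (false, 0, 0)
  1090 - 90 * s.2.2

-- ===== PRECONDITION & SPEC =====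
def Spec_f (a : List Int) (out : Int) : Prop := out = f_alt a
instance (a : List Int) (out : Int) : Decidable (Spec_f a out) := by unfold Spec_f; infer_instance

-- ===== CLAIM (what is proved, stated in full; the proofs are below) =====
def Claim_equal_f : Prop := ∀ (a : List Int), Dom_f a → Spec_f a (f a)

-- ===== LEMMAS AND PROOFS =====

-- pairwise-gap sum characterising A's inner pass over a marks list
def pairSum (m : List Int) : Int :=
  (m.zip m.tail).foldl (fun s p => if p.2 - p.1 ≥ 4 then s + (p.2 - p.1) else s) 0

-- indices (starting at i) of the elements equal to 1 in q
def marksF (q : List Int) (i : Int) : List Int :=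
  match q with
  | [] => []
  | x :: t => if x = 1 then i :: marksF t (i + 1) else marksF t (i + 1)

-- run-length formulation of the penalty: what B's machine accumulates over q from run r
def gapsum (q : List Int) (r : Int) : Int :=
  match q with
  | [] => 0
  | x :: t => if x = 1 then (if r ≥ 3 then r + 1 else 0) + gapsum t 0 else gapsum t (r + 1)

-- the run counter B's machine ends with
def endrun (q : List Int) (r : Int) : Int :=
  match q with
  | [] => r
  | x :: t => if x = 1 then endrun t 0 else endrun t (r + 1)

theorem pairFold_init (m : List (Int × Int)) (s : Int) :
    m.foldl (fun s p => if p.2 - p.1 ≥ 4 then s + (p.2 - p.1) else s) s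
      = s + m.foldl (fun s p => if p.2 - p.1 ≥ 4 then s + (p.2 - p.1) else s) 0 := by
  induction m generalizing s with
  | nil => simp
  | cons x xs ih =>
    simp only [List.foldl_cons]
    rw [ih, ih (if x.2 - x.1 ≥ 4 then 0 + (x.2 - x.1) else 0)]
    split_ifs <;> ring

theorem pairSum_cons (p x : Int) (rest : List Int) :
    pairSum (p :: x :: rest) = (if x - p ≥ 4 then x - p else 0) + pairSum (x :: rest) := by
  simp only [pairSum, List.zip_cons_cons, List.tail_cons, List.foldl_cons]
  rw [pairFold_init]
  split_ifs <;> simp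

-- the generic shape of A's inner fold: it subtracts 90 * pairSum of the marks and
-- ends at the last mark (computed as a fold so no `getLast` side conditions arise)
theorem inner_fold_eq (b : List Int) (L : List Int) (t p : Int) :
    L.foldl
      (fun (s : Int × Int) i1 =>
        if PySem.List.pyGetD b i1 0 = 1 then
          (if i1 - s.2 ≥ 4 then s.1 - 90 * (i1 - s.2) else s.1, i1)
        else s) (t, p)
    = (t - 90 * pairSum (p :: L.filter (fun j => PySem.List.pyGetD b j 0 = 1)),
       (L.filter (fun j => PySem.List.pyGetD b j 0 = 1)).foldl (fun _ x => x) p) := by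
  induction L generalizing t p with
  | nil => simp [pairSum]
  | cons j L ih =>
    by_cases hj : PySem.List.pyGetD b j 0 = 1
    · simp only [List.foldl_cons, List.filter_cons, hj, if_pos, decide_true]
      rw [ih]
      rw [pairSum_cons]
      simp only [Prod.mk.injEq]
      refine ⟨?_, trivial⟩
      split_ifs with h <;> ring
    · simp only [List.foldl_cons, List.filter_cons, hj, decide_false]
      simpa using ih t p

theorem fInner_eq (b : List Int) (i t : Int) :
    fInner b i t
    = (t - 90 * pairSum (i :: (PySem.List.pyRange (i + 1) (b.length : Int) 1).filter
          (fun j => PySem.List.pyGetD b j 0 = 1)),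
       ((PySem.List.pyRange (i + 1) (b.length : Int) 1).filter
          (fun j => PySem.List.pyGetD b j 0 = 1)).foldl (fun _ x => x) i) := by
  unfold fInner
  exact inner_fold_eq b _ t i

-- once i ≥ len - 1 the loop returns tolov whatever the fuel
theorem fLoop_stop (b : List Int) (fuel : Nat) (i t : Int)
    (h : ¬ i < (b.length : Int) - 1) : fLoop b fuel i t = t := by
  cases fuel <;> simp [fLoop, h]

-- if b contains no 0, the loop never fires and returns tolov
theorem fLoop_no_zero (b : List Int) (h0 : (0 : Int) ∉ b) :
    ∀ (fuel : Nat) (i t : Int), -1 ≤ i → fLoop b fuel i t = t := by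
  intro fuel
  induction fuel with
  | zero => intro i t _; simp [fLoop]
  | succ n ih =>
    intro i t hi
    simp only [fLoop]
    split_ifs with h1 h2
    · exfalso
      have hr : PySem.Raise.InRange b.length (i + 1) := by
        unfold PySem.Raise.InRange; omega
      have := PySem.List.pyGetD_mem b (0 : Int) hr
      rw [h2] at this
      exact h0 this
    · exact ih (i + 1) t (by omega)
    · rfl

-- first-zero facts extracted from index?
theorem index?_zero_facts (b : List Int) (z : Nat)
    (hz : PySem.List.index? b 0 = some z) :
    z < b.length ∧ PySem.List.pyGetD b (z : Int) 0 = 0 ∧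
      ∀ j : Nat, j < z → PySem.List.pyGetD b (j : Int) 0 ≠ 0 := by
  obtain ⟨hk, hget, hbefore⟩ := PySem.List.getElem_of_index?_eq_some hz
  refine ⟨hk, ?_, ?_⟩
  · rw [PySem.List.pyGetD_ofNat b z 0 hk, hget]
  · intro j hj
    have hjlen : j < b.length := lt_trans hj hk
    rw [PySem.List.pyGetD_ofNat b j 0 hjlen]
    exact hbefore j hj

-- the marks list ends with len-1 when b ends with a 1, so the inner pass leaves i = len-1
theorem marks_last (b : List Int) (z : Int) (hlast : PySem.List.pyGetD b ((b.length : Int) - 1) 0 = 1)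
    (hz : z + 1 ≤ (b.length : Int) - 1) :
    ((PySem.List.pyRange (z + 1) (b.length : Int) 1).filter
        (fun j => PySem.List.pyGetD b j 0 = 1)).foldl (fun _ x => x) z = (b.length : Int) - 1 := by
  have hsplit := PySem.List.pyRange_one_append (z + 1) ((b.length : Int) - 1) (b.length : Int)
    hz (by omega)
  have hsing : PySem.List.pyRange ((b.length : Int) - 1) (b.length : Int) 1
      = [(b.length : Int) - 1] := by
    rw [PySem.List.pyRange_one_cons (by omega), PySem.List.pyRange_one_eq_nil (by omega)]
  rw [hsplit, hsing, List.filter_append, List.foldl_append]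
  simp [hlast]

-- the main loop lemma: from any i below the first zero z, with all entries before z nonzero,
-- the loop runs to z, fires the inner pass once, and stops at i = len - 1
theorem fLoop_main (b : List Int) (z : Nat)
    (hzlen : (z : Int) < (b.length : Int) - 1)
    (hz0 : PySem.List.pyGetD b (z : Int) 0 = 0)
    (hpre : ∀ j : Nat, j < z → PySem.List.pyGetD b (j : Int) 0 ≠ 0)
    (hlast : PySem.List.pyGetD b ((b.length : Int) - 1) 0 = 1) :
    ∀ (fuel : Nat) (i t : Int), -1 ≤ i → i < (z : Int) → (z : Int) - i ≤ (fuel : Int) →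
      fLoop b fuel i t
        = t - 90 * pairSum ((z : Int) :: (PySem.List.pyRange ((z : Int) + 1) (b.length : Int) 1).filter
            (fun j => PySem.List.pyGetD b j 0 = 1)) := by
  intro fuel
  induction fuel with
  | zero => intro i t _ h2 h3; exfalso; simp at h3; omega
  | succ n ih =>
    intro i t hi hless hfuel
    simp only [fLoop]
    have hcond : i < (b.length : Int) - 1 := by omega
    rw [if_pos hcond]
    by_cases hiz : i + 1 = (z : Int)
    · rw [hiz, if_pos hz0, fInner_eq]
      apply fLoop_stop
      rw [marks_last b (z : Int) hlast (by omega)]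
      omega
    · have hj : ((i + 1).toNat : Int) = i + 1 := by omega
      have hne : PySem.List.pyGetD b (i + 1) 0 ≠ 0 := by
        have := hpre (i + 1).toNat (by omega)
        rwa [hj] at this
      rw [if_neg hne]
      exact ih (i + 1) t (by omega) (by omega) (by omega)

-- ===== bridge: A's index-gap sum = B's run-length sum =====

-- the filtered index range is exactly the marks of the dropped suffix
theorem filter_range_eq_marks (b : List Int) :
    ∀ (m k : Nat), k ≤ b.length → b.length - k = m →
      (PySem.List.pyRange (k : Int) (b.length : Int) 1).filter
          (fun j => PySem.List.pyGetD b j 0 = 1)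
        = marksF (b.drop k) (k : Int) := by
  intro m
  induction m with
  | zero =>
    intro k hk hm
    have hke : k = b.length := by omega
    subst hke
    rw [PySem.List.pyRange_one_eq_nil (by omega), List.drop_length]
    simp [marksF]
  | succ n ih =>
    intro k hk hm
    have hklt : k < b.length := by omega
    rw [PySem.List.pyRange_one_cons (by exact_mod_cast hklt), List.filter_cons,
      List.drop_eq_getElem_cons hklt]
    have hget : PySem.List.pyGetD b (k : Int) 0 = b[k] := PySem.List.pyGetD_ofNat b k 0 hklt
    have hcast : ((k : Int) + 1) = ((k + 1 : Nat) : Int) := by push_cast; ring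
    rw [hcast, ih (k + 1) (by omega) (by omega)]
    by_cases h1 : b[k] = 1
    · simp [marksF, hget, h1]
    · simp [marksF, hget, h1]

-- pairwise gaps of the marks list = run-length sum, when the next index is prev + r + 1
theorem pairSum_marksF (q : List Int) :
    ∀ (prev r : Int), pairSum (prev :: marksF q (prev + r + 1)) = gapsum q r := by
  induction q with
  | nil => intro prev r; simp [marksF, gapsum, pairSum]
  | cons x t ih =>
    intro prev r
    by_cases h1 : x = 1
    · simp only [marksF, gapsum, if_pos h1]
      rw [pairSum_cons]
      have hg : prev + r + 1 - prev = r + 1 := by ring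
      have hnext : prev + r + 1 + 1 = (prev + r + 1) + 0 + 1 := by ring
      rw [hg, hnext, ih (prev + r + 1) 0]
      split_ifs with h2 h3 <;> omega
    · simp only [marksF, gapsum, if_neg h1]
      have hnext : prev + r + 1 + 1 = prev + (r + 1) + 1 := by ring
      rw [hnext]
      exact ih prev (r + 1)

-- B's machine before the first zero: the state is unchanged
theorem fold_prefix (p : List Int) (h : ∀ x ∈ p, x ≠ 0) :
    ∀ (r pn : Int), p.foldl fStep (false, r, pn) = (false, r, pn) := by
  induction p with
  | nil => intro r pn; rfl
  | cons x t ih =>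
    intro r pn
    have hx : x ≠ 0 := h x (List.mem_cons_self ..)
    simp only [List.foldl_cons, fStep, if_neg hx]
    exact ih (fun y hy => h y (List.mem_cons_of_mem _ hy)) r pn

-- B's machine after the first zero accumulates gapsum
theorem fStep_true (r pn x : Int) :
    fStep (true, r, pn) x
      = if x = 1 then (true, 0, if r ≥ 3 then pn + r + 1 else pn) else (true, r + 1, pn) := by
  simp [fStep]

theorem fold_machine (q : List Int) :
    ∀ (r pn : Int), q.foldl fStep (true, r, pn) = (true, endrun q r, pn + gapsum q r) := by
  induction q with
  | nil => intro r pn; simp [endrun, gapsum]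
  | cons x t ih =>
    intro r pn
    simp only [List.foldl_cons, fStep_true]
    by_cases h1 : x = 1
    · simp only [h1, endrun, gapsum, if_true]
      rw [ih 0 _]
      split_ifs with h2 <;> simp
      ring
    · simp only [if_neg h1, endrun, gapsum]
      rw [ih (r + 1) pn]

-- B's value, characterised by the first zero
theorem f_alt_char (b : List Int) (z : Nat) (hzlen : z < b.length)
    (hz0 : b[z] = 0) (hpre : ∀ x ∈ b.take z, x ≠ 0) :
    b.foldl fStep (false, 0, 0) = (true, endrun (b.drop (z + 1)) 0, gapsum (b.drop (z + 1)) 0) := by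
  conv_lhs => rw [← List.take_append_drop z b]
  rw [List.foldl_append, fold_prefix (b.take z) hpre 0 0,
    List.drop_eq_getElem_cons hzlen, hz0]
  simp only [List.foldl_cons, fStep]
  simpa using fold_machine (b.drop (z + 1)) 0 0

theorem f_eq_f_alt (a : List Int) : f a = f_alt a := by
  by_cases hmem : (0 : Int) ∈ a ++ [1]
  · have hsome : (PySem.List.index? (a ++ [1]) 0).isSome := by
      rw [PySem.List.index?_isSome_iff]; exact hmem
    obtain ⟨z, hz⟩ := Option.isSome_iff_exists.mp hsome
    obtain ⟨hzlen, hz0, hpre⟩ := index?_zero_facts _ z hz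
    have hblen : (a ++ [1]).length = a.length + 1 := by simp
    have hlast : PySem.List.pyGetD (a ++ [1]) (((a ++ [1]).length : Int) - 1) 0 = 1 := by
      have : (((a ++ [1]).length : Int) - 1) = (a.length : Int) := by rw [hblen]; push_cast; ring
      rw [this]
      have hl : a.length < (a ++ [1]).length := by omega
      rw [PySem.List.pyGetD_ofNat (a ++ [1]) a.length 0 hl]
      simp
    -- z is not the last index since b[z] = 0 ≠ 1
    have hzlt : (z : Int) < ((a ++ [1]).length : Int) - 1 := by
      by_contra hcon
      have hzeq : z = a.length := by omega
      rw [hzeq, show ((a.length : Nat) : Int) = ((a ++ [1]).length : Int) - 1 by omega,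
        hlast] at hz0
      exact one_ne_zero hz0
    -- A's value via the loop lemma
    have hA : f a = 1090 - 90 * pairSum ((z : Int) ::
        (PySem.List.pyRange ((z : Int) + 1) ((a ++ [1]).length : Int) 1).filter
          (fun j => PySem.List.pyGetD (a ++ [1]) j 0 = 1)) := by
      show fLoop (a ++ [1]) ((a ++ [1]).length + 1) (-1) 1090 = _
      exact fLoop_main (a ++ [1]) z hzlt hz0 hpre hlast ((a ++ [1]).length + 1) (-1) 1090
          (by omega) (by omega) (by omega)
    -- B's value via the machine characterisation
    have hz0' : (a ++ [1])[z] = 0 := by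
      rwa [PySem.List.pyGetD_ofNat (a ++ [1]) z 0 hzlen] at hz0
    have hpre' : ∀ x ∈ (a ++ [1]).take z, x ≠ 0 := by
      intro x hx
      obtain ⟨j, hj, hjx⟩ := List.getElem_of_mem hx
      have hjz : j < z := by
        have := hj
        simp only [List.length_take] at this
        omega
      have hjlen : j < (a ++ [1]).length := lt_trans hjz hzlen
      have : x = (a ++ [1])[j] := by
        rw [← hjx, List.getElem_take]
      rw [this]
      have := hpre j hjz
      rwa [PySem.List.pyGetD_ofNat (a ++ [1]) j 0 hjlen] at this
    have hB : f_alt a = 1090 - 90 * gapsum ((a ++ [1]).drop (z + 1)) 0 := by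
      show 1090 - 90 * ((a ++ [1]).foldl fStep (false, 0, 0)).2.2 = _
      rw [f_alt_char (a ++ [1]) z hzlen hz0' hpre']
    rw [hA, hB]
    -- bridge the two penalty sums
    have hfr := filter_range_eq_marks (a ++ [1]) ((a ++ [1]).length - (z + 1)) (z + 1)
      (by omega) rfl
    have hcast : (((z + 1 : Nat)) : Int) = (z : Int) + 1 := by push_cast; ring
    rw [hcast] at hfr
    rw [hfr]
    have hps := pairSum_marksF ((a ++ [1]).drop (z + 1)) (z : Int) 0
    rw [show (z : Int) + 0 + 1 = (z : Int) + 1 by ring] at hps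
    rw [hps]
  · have hpre : ∀ x ∈ a ++ [1], x ≠ 0 := by
      intro x hx h0; rw [h0] at hx; exact hmem hx
    have hB : f_alt a = 1090 := by
      show 1090 - 90 * ((a ++ [1]).foldl fStep (false, 0, 0)).2.2 = 1090
      rw [fold_prefix (a ++ [1]) hpre 0 0]
      norm_num
    rw [hB]
    exact fLoop_no_zero (a ++ [1]) hmem _ (-1) 1090 (by omega)

-- ===== VERDICT (by name: the statement is the Claim_ definition above) =====
theorem f_spec : Claim_equal_f := by
  intro a _
  unfold Spec_f
  exact f_eq_f_alt a
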